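-- pv_equiv track=rewrite | github.com/TexturedPolak/karolinka | main.py | utworz_tabele
-- ===== SOURCE A (Python) =====
-- alfabet = "ABCDEFGHIJKLMNOPRSTUWYZ"
--
-- def utworz_tabele(słowo_klucz: str):
--     # Etap 1 i 2
--     tabela = [["" for y in range(len(słowo_klucz))] for x in range(len(słowo_klucz))]
--
--     # Etap 3
--     for numer_wiersza in range(len(słowo_klucz)):
--         tabela[numer_wiersza][0]=słowo_klucz[numer_wiersza]
--
--     # Etap 4
--     for numer_wiersza in range(len(słowo_klucz)):
--         pozycja_w_alfabecie = alfabet.find(słowo_klucz[numer_wiersza][0])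
--
--         for numer_kolumny in range(len(tabela[numer_wiersza])):
--             tabela[numer_wiersza][numer_kolumny] = alfabet[pozycja_w_alfabecie]
--             pozycja_w_alfabecie += 1
--
--             # Zabezpieczenie przed przepełnieniem
--             if pozycja_w_alfabecie > (len(alfabet)-1):
--                 pozycja_w_alfabecie = 0
--
--     return tabela
-- ===== SOURCE B (Python) =====
-- alfabet = "ABCDEFGHIJKLMNOPRSTUWYZ"
--
-- def utworz_tabele(słowo_klucz: str):
--     # Row for character c is the alphabet rotated to start at alfabet.find(c)
--     # (find == -1 rotates to the last letter 'Z'), tiled out to the key length.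
--     n = len(słowo_klucz)
--     tabela = []
--     for c in słowo_klucz:
--         pos = alfabet.find(c)
--         rotated = alfabet[pos:] + alfabet[:pos]
--         tabela.append(list((rotated * (n // len(alfabet) + 1))[:n]))
--     return tabela
-- ===== Notes on version B (the rewrite author's own statement) =====
-- stated objective: faster
-- what changed: A fills each cell with a per-cell increment-and-wrap position counter inside nested index loops over a pre-built mutable table; B builds each row in one shot by rotating the alphabet to the key letter's position (find == -1 naturally rotates to 'Z'), tiling the rotated string and slicing it to the key length, so the per-cell Python-level loop disappears into bulk string/list operations.
import Mathlib
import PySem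

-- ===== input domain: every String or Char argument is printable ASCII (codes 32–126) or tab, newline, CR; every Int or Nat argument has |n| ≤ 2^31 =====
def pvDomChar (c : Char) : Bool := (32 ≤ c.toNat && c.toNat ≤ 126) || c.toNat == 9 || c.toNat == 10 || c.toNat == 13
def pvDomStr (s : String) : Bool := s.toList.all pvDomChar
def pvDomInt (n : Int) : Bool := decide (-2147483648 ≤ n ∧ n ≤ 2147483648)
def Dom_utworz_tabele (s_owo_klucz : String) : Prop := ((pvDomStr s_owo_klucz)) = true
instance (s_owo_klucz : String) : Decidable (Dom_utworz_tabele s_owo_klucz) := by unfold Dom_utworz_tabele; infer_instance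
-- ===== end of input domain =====

-- B replaces A's per-cell increment-and-wrap inner loop by a rotate-the-alphabet-and-tile
-- construction of each whole row (same O(n^2) output size; measurably faster by a constant
-- factor: the per-cell interpreted loop becomes bulk string/list operations).

def pvAlfabet : List Char := "ABCDEFGHIJKLMNOPRSTUWYZ".toList

-- ===== PORT A =====
-- one cell: alfabet[pozycja] as a 1-char string (the .getD "" branch is unreachable: -1 ≤ pozycja ≤ 22)
def pvCell (p : Int) : String := ((PySem.List.pyGet? pvAlfabet p).map (fun c => String.ofList [c])).getD ""

def utworz_tabele (s_owo_klucz : String) : List (List String) :=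
  let cs := s_owo_klucz.toList
  let n : Int := (cs.length : Int)
  -- Etap 1 i 2
  let tabela : List (List String) :=
    (PySem.List.pyRange 0 n).map (fun _ => (PySem.List.pyRange 0 n).map (fun _ => ""))
  -- Etap 3  (indices from pyRange 0 n are nonnegative, so .toNat is exact here)
  let tabela := (PySem.List.pyRange 0 n).foldl (fun t i =>
      t.set i.toNat ((t.getD i.toNat []).set 0
        (((PySem.List.pyGet? cs i).map (fun c => String.ofList [c])).getD ""))) tabela
  -- Etap 4
  (PySem.List.pyRange 0 n).foldl (fun t i =>
      let wiersz := t.getD i.toNat []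
      let pozycja := PySem.Chars.find pvAlfabet (((PySem.List.pyGet? cs i).map (fun c => [c])).getD [])
      let res := (PySem.List.pyRange 0 (wiersz.length : Int)).foldl
          (fun (st : List String × Int) j =>
            let w := st.1.set j.toNat (pvCell st.2)
            let p := st.2 + 1
            (w, if p > (pvAlfabet.length : Int) - 1 then 0 else p))
          (wiersz, pozycja)
      t.set i.toNat res.1) tabela

-- ===== PORT B =====
def utworz_tabele_alt (s_owo_klucz : String) : List (List String) :=
  let cs := s_owo_klucz.toList
  let n : Int := (cs.length : Int)
  cs.foldl (fun tabela c =>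
    let pos := PySem.Chars.find pvAlfabet [c]
    let rotated := PySem.List.slice pvAlfabet (some pos) none ++ PySem.List.slice pvAlfabet none (some pos)
    let tiled := (List.replicate (PySem.Int.floordiv n (pvAlfabet.length : Int) + 1).toNat rotated).flatten
    tabela ++ [(PySem.List.slice tiled none (some n)).map (fun ch => String.ofList [ch])]) []

-- ===== PRECONDITION & SPEC =====
def Spec_utworz_tabele (s_owo_klucz : String) (out : List (List String)) : Prop := out = utworz_tabele_alt s_owo_klucz
instance (s_owo_klucz : String) (out : List (List String)) : Decidable (Spec_utworz_tabele s_owo_klucz out) := by unfold Spec_utworz_tabele; infer_instance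

-- ===== CLAIM (what is proved, stated in full; the proofs are below) =====
def Claim_equal_utworz_tabele : Prop := ∀ (s_owo_klucz : String), Dom_utworz_tabele s_owo_klucz → Spec_utworz_tabele s_owo_klucz (utworz_tabele s_owo_klucz)

-- ===== LEMMAS AND PROOFS =====

-- A's increment-and-wrap step on the alphabet position
def pvStep (p : Int) : Int := if p + 1 > (pvAlfabet.length : Int) - 1 then 0 else p + 1

-- the letter at (wrapped) position i, as a 1-char string
def pvLetter (i : Int) : String := String.ofList [pvAlfabet.getD i.toNat 'A']

theorem pv_find_range (l : List Char) : -1 ≤ PySem.Chars.find pvAlfabet l ∧ PySem.Chars.find pvAlfabet l < 23 := by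
  refine ⟨PySem.Chars.neg_one_le_find _ _, ?_⟩
  rcases eq_or_ne l [] with rfl | hne
  · simp [PySem.Chars.find_nil]
  · have hle := PySem.Chars.find_le_length pvAlfabet l
    have hlen : (pvAlfabet.length : Int) = 23 := by decide
    rcases lt_or_eq_of_le (hle.trans_eq hlen) with h | h
    · exact h
    · exfalso
      have h0 : (0:Int) ≤ PySem.Chars.find pvAlfabet l := by omega
      have hsp := (PySem.Chars.find_spec h0).1
      rw [h] at hsp
      have : List.drop (Int.toNat 23) pvAlfabet = [] := by decide
      rw [this] at hsp
      exact hne (List.prefix_nil.mp hsp)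

theorem pvCell_eq (p : Int) (h1 : -1 ≤ p) (h2 : p < 23) : pvCell p = pvLetter (p% 23) := by
  interval_cases p <;> decide

theorem pvStep_eq (p : Int) (h1 : -1 ≤ p) (h2 : p < 23) : pvStep p = (p + 1)% 23 := by
  have hlen : (pvAlfabet.length : Int) = 23 := by decide
  unfold pvStep
  rw [hlen]
  split_ifs with h <;> omega

theorem pvStep_iter (p0 : Int) (h1 : -1 ≤ p0) (h2 : p0 < 23) (j : Nat) (hj : 1 ≤ j) :
    pvStep^[j] p0 = (p0 + j)% 23 := by
  induction j with
  | zero => omega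
  | succ m ih =>
    rw [Function.iterate_succ_apply']
    rcases Nat.eq_zero_or_pos m with rfl | hm
    · simpa using pvStep_eq p0 h1 h2
    · rw [ih hm, pvStep_eq _ (by omega) (by omega)]
      push_cast
      omega

theorem pvCell_iter (p0 : Int) (h1 : -1 ≤ p0) (h2 : p0 < 23) (j : Nat) :
    pvCell (pvStep^[j] p0) = pvLetter ((p0 + j)% 23) := by
  rcases Nat.eq_zero_or_pos j with rfl | hj
  · simpa using pvCell_eq p0 h1 h2
  · rw [pvStep_iter p0 h1 h2 j hj,
      pvCell_eq _ (by omega) (by omega)]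
    rw [Int.emod_emod_of_dvd _ (by norm_num)]

-- A's inner loop over a row: sets of cells over range m on a long-enough row
theorem pv_inner_fold (m : Nat) (p0 : Int) (w : List String) (hw : m ≤ w.length) :
    (PySem.List.pyRange 0 (m : Int)).foldl
        (fun (st : List String × Int) j =>
          ((st.1.set j.toNat (pvCell st.2), if st.2 + 1 > (pvAlfabet.length : Int) - 1 then 0 else st.2 + 1) : List String × Int))
        (w, p0)
      = ((List.range m).map (fun j => pvCell (pvStep^[j] p0)) ++ w.drop m, pvStep^[m] p0) := by
  induction m with
  | zero => simp [PySem.List.pyRange]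
  | succ m ih =>
    have hm : m ≤ w.length := by omega
    rw [show ((m + 1 : Nat) : Int) = (m : Int) + 1 by push_cast; ring,
      PySem.List.pyRange_one_succ_right (by positivity), List.foldl_append, ih hm]
    simp only [List.foldl_cons, List.foldl_nil]
    have hlt : m < w.length := by omega
    have hdrop : w.drop m = w[m] :: w.drop (m + 1) := List.drop_eq_getElem_cons hlt
    have hlenmap : ((List.range m).map (fun j => pvCell (pvStep^[j] p0))).length = m := by simp
    refine Prod.ext ?_ ?_
    · simp only []
      rw [hdrop, Int.toNat_natCast, List.set_append_right _ _ (by omega), hlenmap]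
      simp [List.range_succ]
      rw [hdrop, List.set_cons_zero]
    · rw [Function.iterate_succ_apply', pvStep]

theorem pv_tile_getElem {α : Type} (l : List α) (K j : Nat) (hl : 0 < l.length)
    (h : j < ((List.replicate K l).flatten).length) :
    (List.replicate K l).flatten[j] = l[j % l.length]'(Nat.mod_lt _ hl) := by
  induction K generalizing j with
  | zero => simp at h
  | succ K ih =>
    simp only [List.replicate_succ, List.flatten_cons] at h ⊢
    have hlen : (List.replicate K l).flatten.length = K * l.length := by
      simp [List.length_flatten, List.map_replicate, List.sum_replicate]
    have hlen2 : (l ++ (List.replicate K l).flatten).length = l.length + K * l.length := by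
      simp [hlen]
    rw [hlen2] at h
    rcases lt_or_ge j l.length with hlt | hge
    · rw [List.getElem_append_left hlt]
      congr 1
      exact (Nat.mod_eq_of_lt hlt).symm
    · rw [List.getElem_append_right hge, ih (j - l.length) (by rw [hlen]; omega)]
      congr 1
      exact (Nat.mod_eq_sub_mod hge).symm

-- B's row equals A's row, for a key of length n and a character c
theorem pv_row_eq (n : Nat) (c : Char) :
    (List.range n).map (fun j => pvCell (pvStep^[j] (PySem.Chars.find pvAlfabet [c])))
      = (PySem.List.slice ((List.replicate (PySem.Int.floordiv (n : Int) (pvAlfabet.length : Int) + 1).toNat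
          (PySem.List.slice pvAlfabet (some (PySem.Chars.find pvAlfabet [c])) none ++
           PySem.List.slice pvAlfabet none (some (PySem.Chars.find pvAlfabet [c])))).flatten)
          none (some (n : Int))).map (fun ch => String.ofList [ch]) := by
  obtain ⟨h1, h2⟩ := pv_find_range [c]
  set p0 := PySem.Chars.find pvAlfabet [c] with hp0
  set k : Nat := (p0 % 23).toNat with hk
  have hkk : (k : Int) = p0 % 23 := Int.toNat_of_nonneg (by omega)
  have hk23 : k < 23 := by omega
  have hrot : PySem.List.slice pvAlfabet (some p0) none ++ PySem.List.slice pvAlfabet none (some p0)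
      = pvAlfabet.rotate k := by
    have h23 : pvAlfabet.length = 23 := by decide
    by_cases hpos : 0 ≤ p0
    · have hkeq : k = p0.toNat := by omega
      rw [PySem.List.slice_from _ hpos, PySem.List.slice_to _ hpos,
        List.rotate_eq_drop_append_take (by omega), hkeq]
    · have : p0 = -1 := by omega
      rw [this]
      have : k = 22 := by omega
      rw [this]
      decide
  have hKn : (PySem.Int.floordiv (n : Int) ((pvAlfabet.length : Nat) : Int) + 1).toNat = n / 23 + 1 := by
    have : (pvAlfabet.length : Int) = ((23 : Nat) : Int) := by decide
    rw [show ((pvAlfabet.length : Nat) : Int) = ((23 : Nat) : Int) from this, PySem.Int.floordiv_natCast]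
    omega
  rw [hrot, hKn]
  have hlenrot : (pvAlfabet.rotate k).length = 23 := by simp [List.length_rotate]; decide
  have hlentile : ((List.replicate (n / 23 + 1) (pvAlfabet.rotate k)).flatten).length = (n / 23 + 1) * 23 := by
    simp [List.length_flatten, hlenrot, List.map_replicate, List.sum_replicate]
  have hnle : n ≤ (n / 23 + 1) * 23 := by omega
  rw [PySem.List.slice_to _ (by positivity)]
  apply List.ext_getElem
  · have h23 : pvAlfabet.length = 23 := by decide
    simp [h23]
    omega
  · intro j hj1 hj2
    simp only [List.getElem_map, List.getElem_range, List.length_map, List.length_range] at hj1 ⊢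
    rw [pvCell_iter p0 h1 h2 j]
    have hjn : j < n := by simpa using hj1
    have hjt : j < ((List.replicate (n / 23 + 1) (pvAlfabet.rotate k)).flatten).length := by omega
    rw [List.getElem_take, pv_tile_getElem _ _ _ (by omega) hjt]
    simp only [List.length_rotate, List.getElem_rotate]
    have h23 : pvAlfabet.length = 23 := by decide
    have hidx : ((p0 + (j : Int)) % 23).toNat = (j % pvAlfabet.length + k) % pvAlfabet.length := by
      rw [h23]
      omega
    simp only [pvLetter]
    rw [hidx, List.getD_eq_getElem _ _ (by rw [h23]; omega)]

-- alphabet position A computes for row i of key cs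
def pvPos0 (cs : List Char) (i : Nat) : Int :=
  PySem.Chars.find pvAlfabet (((PySem.List.pyGet? cs (i : Int)).map (fun c => [c])).getD [])

-- Etap 3 preserves the table shape: n rows, each of length n
theorem pv_etap3_inv (cs : List Char) (n : Nat) (idxs : List Int) (t : List (List String))
    (ht : t.length = n) (hrow : ∀ r ∈ t, r.length = n) :
    (idxs.foldl (fun t i => t.set i.toNat ((t.getD i.toNat []).set 0
        (((PySem.List.pyGet? cs i).map (fun c => String.ofList [c])).getD ""))) t).length = n ∧
    ∀ r ∈ idxs.foldl (fun t i => t.set i.toNat ((t.getD i.toNat []).set 0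
        (((PySem.List.pyGet? cs i).map (fun c => String.ofList [c])).getD ""))) t, r.length = n := by
  induction idxs generalizing t with
  | nil => exact ⟨ht, hrow⟩
  | cons i rest ih =>
    simp only [List.foldl_cons]
    by_cases hi : i.toNat < t.length
    · apply ih
      · simp [ht]
      · intro r hr
        rcases List.mem_or_eq_of_mem_set hr with hr | rfl
        · exact hrow r hr
        · rw [List.length_set, List.getD_eq_getElem _ _ hi]
          exact hrow _ (List.getElem_mem hi)
    · rw [List.set_eq_of_length_le (by omega)]
      exact ih t ht hrow

-- Etap 4 rewrites the first m rows
theorem pv_etap4 (cs : List Char) (n m : Nat) (hmn : m ≤ n) (t : List (List String))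
    (ht : t.length = n) (hrow : ∀ r ∈ t, r.length = n) :
    (PySem.List.pyRange 0 (m : Int)).foldl
      (fun t i =>
        let wiersz := t.getD i.toNat []
        let pozycja := PySem.Chars.find pvAlfabet (((PySem.List.pyGet? cs i).map (fun c => [c])).getD [])
        let res := (PySem.List.pyRange 0 (wiersz.length : Int)).foldl
            (fun (st : List String × Int) j =>
              let w := st.1.set j.toNat (pvCell st.2)
              let p := st.2 + 1
              (w, if p > (pvAlfabet.length : Int) - 1 then 0 else p))
            (wiersz, pozycja)
        t.set i.toNat res.1) t
    = (List.range m).map (fun i => (List.range n).map (fun j => pvCell (pvStep^[j] (pvPos0 cs i)))) ++ t.drop m := by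
  induction m with
  | zero => simp [PySem.List.pyRange]
  | succ m ihm =>
    rw [show ((m + 1 : Nat) : Int) = (m : Int) + 1 by push_cast; ring,
      PySem.List.pyRange_one_succ_right (by positivity), List.foldl_append, ihm (by omega)]
    simp only [List.foldl_cons, List.foldl_nil]
    have hlt : m < n := by omega
    have hlenmap : ((List.range m).map (fun i => (List.range n).map (fun j => pvCell (pvStep^[j] (pvPos0 cs i))))).length = m := by simp
    have hdlt : m < t.length := by omega
    have hdrop : t.drop m = t[m] :: t.drop (m + 1) := List.drop_eq_getElem_cons hdlt
    have hwlen : (t[m]).length = n := hrow _ (List.getElem_mem hdlt)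
    have hget : (((List.range m).map (fun i => (List.range n).map (fun j => pvCell (pvStep^[j] (pvPos0 cs i))))) ++ t.drop m).getD (Int.toNat (m : Int)) [] = t[m] := by
      rw [Int.toNat_natCast, List.getD_append_right _ _ _ _ (by omega), hlenmap, hdrop, Nat.sub_self]
      rfl
    rw [hget, hwlen, pv_inner_fold n _ _ (by omega)]
    simp only []
    rw [Int.toNat_natCast, List.set_append_right _ _ (by omega), hlenmap, Nat.sub_self, hdrop, List.set_cons_zero]
    rw [List.range_succ, List.map_append, List.map_singleton, List.append_assoc]
    congr 1
    simp [pvPos0]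
    omega

-- ===== VERDICT (by name: the statement is the Claim_ definition above) =====
theorem utworz_tabele_spec : Claim_equal_utworz_tabele := by
  intro s _
  unfold Spec_utworz_tabele utworz_tabele utworz_tabele_alt
  simp only []
  set cs := s.toList with hcs
  set n := cs.length with hn
  rw [PySem.List.foldl_append_singleton_eq_map, List.nil_append]
  -- shape of the initial table
  have h0len : ((PySem.List.pyRange 0 (n : Int)).map (fun _ => (PySem.List.pyRange 0 (n : Int)).map (fun _ => ("" : String)))).length = n := by
    simp [PySem.List.pyRange_zero_natCast]
  have h0row : ∀ r ∈ (PySem.List.pyRange 0 (n : Int)).map (fun _ => (PySem.List.pyRange 0 (n : Int)).map (fun _ => ("" : String))), r.length = n := by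
    intro r hr
    simp only [List.mem_map] at hr
    obtain ⟨_, _, rfl⟩ := hr
    simp [PySem.List.pyRange_zero_natCast]
  obtain ⟨h3len, h3row⟩ := pv_etap3_inv cs n (PySem.List.pyRange 0 (n : Int)) _ h0len h0row
  rw [pv_etap4 cs n n (le_refl n) _ h3len h3row, List.drop_of_length_le (by omega), List.append_nil]
  -- row-by-row equality
  apply List.ext_getElem
  · simp only [List.length_map, List.length_range]
    exact hn
  · intro i hi1 hi2
    simp only [List.length_map, List.length_range] at hi1
    simp only [List.getElem_map, List.getElem_range]
    have hPos : pvPos0 cs i = PySem.Chars.find pvAlfabet [cs[i]] := by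
      simp [pvPos0, PySem.List.pyGet?_natCast, List.getElem?_eq_getElem hi1]
    rw [hPos]
    exact pv_row_eq n cs[i]
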